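-- pv_equiv track=rewrite | github.com/talpert022/advent_of_code | 2015/problem5/script.py | is_nice_two
-- ===== SOURCE A (Python) =====
-- def is_nice_two(str):
--     interrupted_repeat = False
--     has_non_overlapping_pair = False
--
--     for idx, char in enumerate(str):
--         if idx >= 1:
--             pair = str[idx-1:idx+1]
--             if pair in str[idx+1:]:
--                 has_non_overlapping_pair = True
--         if idx >= 2:
--             if char == str[idx-2]:
--                 interrupted_repeat = True
--
--     return has_non_overlapping_pair and interrupted_repeat
-- ===== SOURCE B (Python) =====
-- def is_nice_two(str):
--     # single pass: remember the first index each 2-char pair was seen at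
--     first_seen = {}
--     has_pair = False
--     for i in range(len(str) - 1):
--         pair = str[i:i+2]
--         if pair in first_seen:
--             if first_seen[pair] + 2 <= i:
--                 has_pair = True
--         else:
--             first_seen[pair] = i
--     gap = any(str[i] == str[i + 2] for i in range(len(str) - 2))
--     return has_pair and gap
-- ===== Notes on version B (the rewrite author's own statement) =====
-- stated objective: faster
-- what changed: Replaced A's per-index substring search in the remaining suffix (quadratic) by a single pass keeping a dict of the first index each 2-char pair was seen at, plus a direct gap scan s[i]==s[i+2].
import Mathlib
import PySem

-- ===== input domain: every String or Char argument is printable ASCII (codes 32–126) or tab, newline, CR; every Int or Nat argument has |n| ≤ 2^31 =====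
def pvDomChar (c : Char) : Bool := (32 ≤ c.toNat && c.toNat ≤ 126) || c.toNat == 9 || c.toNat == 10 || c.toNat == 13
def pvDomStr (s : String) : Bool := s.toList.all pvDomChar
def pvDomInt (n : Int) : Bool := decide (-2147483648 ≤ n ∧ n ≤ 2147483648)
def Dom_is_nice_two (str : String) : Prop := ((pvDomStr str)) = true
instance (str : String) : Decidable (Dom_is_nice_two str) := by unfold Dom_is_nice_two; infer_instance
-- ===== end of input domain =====

-- B replaces A's quadratic per-index substring search by one pass over the pairs with a
-- first-seen-index dict and a direct s[i]==s[i+2] gap scan (objective: faster, O(n)).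

-- ===== PORT A =====
def is_nice_two (str : String) : Bool :=
  let s := str.toList
  let r := (PySem.List.enumerate s).foldl
    (fun (st : Bool × Bool) (p : Int × Char) =>
      let hp := if 1 ≤ p.1 then
          (if PySem.Chars.isIn (PySem.List.slice s (some (p.1 - 1)) (some (p.1 + 1)))
               (PySem.List.slice s (some (p.1 + 1)) none)
           then true else st.2)
        else st.2
      let ir := if 2 ≤ p.1 then
          (if PySem.List.pyGet? s (p.1 - 2) == some p.2 then true else st.1)
        else st.1
      (ir, hp)) (false, false)
  r.2 && r.1

-- ===== PORT B =====
def is_nice_two_alt (str : String) : Bool :=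
  let s := str.toList
  let n : Int := (s.length : Int)
  let r := (PySem.List.pyRange 0 (n - 1) 1).foldl
    (fun (st : PySem.Dict (List Char) Int × Bool) (i : Int) =>
      let pair := PySem.List.slice s (some i) (some (i + 2))
      if st.1.contains pair then
        -- first_seen[pair]: key present (guarded by the contains test), so getD is exact
        (st.1, if st.1.getD pair 0 + 2 ≤ i then true else st.2)
      else
        (st.1.insert pair i, st.2)) (PySem.Dict.empty, false)
  let gap := (PySem.List.pyRange 0 (n - 2) 1).any
    (fun i => PySem.List.pyGet? s i == PySem.List.pyGet? s (i + 2))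
  r.2 && gap

-- ===== PRECONDITION & SPEC =====
def Spec_is_nice_two (str : String) (out : Bool) : Prop := out = is_nice_two_alt str
instance (str : String) (out : Bool) : Decidable (Spec_is_nice_two str out) := by unfold Spec_is_nice_two; infer_instance

-- ===== CLAIM (what is proved, stated in full; the proofs are below) =====
def Claim_equal_is_nice_two : Prop := ∀ (str : String), Dom_is_nice_two str → Spec_is_nice_two str (is_nice_two str)

-- ===== LEMMAS AND PROOFS =====

-- pair starting at index i (as a list of ≤ 2 chars), and the two properties both programs decide
def pvPairN (s : List Char) (i : Nat) : List Char := (s.drop i).take 2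

def pvGoodPair (s : List Char) : Prop :=
  ∃ i j : Nat, i + 2 ≤ j ∧ j + 1 < s.length ∧ s[i]? = s[j]? ∧ s[i+1]? = s[j+1]?

def pvGap (s : List Char) : Prop := ∃ k : Nat, k + 2 < s.length ∧ s[k]? = s[k+2]?

def pvHA (s : List Char) (p : Int × Char) : Bool :=
  decide (1 ≤ p.1) &&
    PySem.Chars.isIn (PySem.List.slice s (some (p.1 - 1)) (some (p.1 + 1)))
      (PySem.List.slice s (some (p.1 + 1)) none)

def pvGA (s : List Char) (p : Int × Char) : Bool :=
  decide (2 ≤ p.1) && (PySem.List.pyGet? s (p.1 - 2) == some p.2)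

-- A's loop with its two monotone flags is two `any`s
lemma pvA_fold (s : List Char) : ∀ (l : List (Int × Char)) (a b : Bool),
    l.foldl (fun (st : Bool × Bool) (p : Int × Char) =>
      let hp := if 1 ≤ p.1 then
          (if PySem.Chars.isIn (PySem.List.slice s (some (p.1 - 1)) (some (p.1 + 1)))
               (PySem.List.slice s (some (p.1 + 1)) none)
           then true else st.2)
        else st.2
      let ir := if 2 ≤ p.1 then
          (if PySem.List.pyGet? s (p.1 - 2) == some p.2 then true else st.1)
        else st.1
      (ir, hp)) (a, b)
    = (a || l.any (pvGA s), b || l.any (pvHA s)) := by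
  intro l
  induction l with
  | nil => intro a b; simp
  | cons p l ih =>
    intro a b
    simp only [List.foldl_cons, List.any_cons]
    have h1 : (if 2 ≤ p.1 then
        (if PySem.List.pyGet? s (p.1 - 2) == some p.2 then true else a) else a)
        = (a || pvGA s p) := by
      by_cases h : 2 ≤ p.1
      · by_cases h2 : (PySem.List.pyGet? s (p.1 - 2) == some p.2) = true
        · simp [pvGA, h, h2]
        · simp only [Bool.not_eq_true] at h2; simp [pvGA, h, h2]
      · simp [pvGA, h]
    have h2 : (if 1 ≤ p.1 then
        (if PySem.Chars.isIn (PySem.List.slice s (some (p.1 - 1)) (some (p.1 + 1)))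
             (PySem.List.slice s (some (p.1 + 1)) none) then true else b) else b)
        = (b || pvHA s p) := by
      by_cases h : 1 ≤ p.1
      · by_cases h3 : PySem.Chars.isIn (PySem.List.slice s (some (p.1 - 1)) (some (p.1 + 1)))
             (PySem.List.slice s (some (p.1 + 1)) none) = true
        · simp [pvHA, h, h3]
        · simp only [Bool.not_eq_true] at h3; simp [pvHA, h, h3]
      · simp [pvHA, h]
    simp only [h1, h2]
    rw [ih]
    simp [Bool.or_assoc]

lemma pvAny_enumerate {α : Type} (f : Int × α → Bool) :
    ∀ (s : List α) (st : Int),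
    (PySem.List.enumerate s st).any f = true ↔
      ∃ (k : Nat) (c : α), s[k]? = some c ∧ f (st + (k : Int), c) = true := by
  intro s
  induction s with
  | nil => intro st; simp [PySem.List.enumerate_nil]
  | cons x xs ih =>
    intro st
    rw [PySem.List.enumerate_cons]
    simp only [List.any_cons, Bool.or_eq_true, ih (st + 1)]
    constructor
    · rintro (h | ⟨k, c, hk, hf⟩)
      · exact ⟨0, x, by simp, by simpa using h⟩
      · refine ⟨k + 1, c, by simpa using hk, ?_⟩
        have e : st + ((k + 1 : Nat) : Int) = st + 1 + (k : Int) := by push_cast; ring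
        rw [e]; exact hf
    · rintro ⟨k, c, hk, hf⟩
      cases k with
      | zero =>
        left
        simp only [List.getElem?_cons_zero, Option.some.injEq] at hk
        subst hk
        simpa using hf
      | succ k =>
        right
        refine ⟨k, c, by simpa using hk, ?_⟩
        have e : st + ((k + 1 : Nat) : Int) = st + 1 + (k : Int) := by push_cast; ring
        rw [e] at hf; exact hf

lemma pvPairN_pred (s : List Char) (k : Nat) (h1 : 1 ≤ k) (h : k < s.length) :
    pvPairN s (k - 1) = [s[k - 1], s[k]] := by
  unfold pvPairN
  rw [List.drop_eq_getElem_cons (show k - 1 < s.length by omega)]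
  have e : k - 1 + 1 = k := by omega
  rw [List.take_succ_cons, e, List.drop_eq_getElem_cons h, List.take_succ_cons]
  simp

lemma pvPairN_eq (s : List Char) (i : Nat) (h : i + 1 < s.length) :
    pvPairN s i = [s[i], s[i+1]] := by
  unfold pvPairN
  rw [List.drop_eq_getElem_cons (show i < s.length by omega), List.take_succ_cons,
    List.drop_eq_getElem_cons h, List.take_succ_cons]
  simp

lemma pvInfix_pair (a b : Char) (t : List Char) :
    [a, b] <:+: t ↔ ∃ m : Nat, t[m]? = some a ∧ t[m+1]? = some b := by
  constructor
  · rintro ⟨u, v, rfl⟩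
    exact ⟨u.length, by simp, by simp⟩
  · rintro ⟨m, ha, hb⟩
    have h1 : m < t.length := (List.getElem?_eq_some_iff.mp ha).1
    have h2 : m + 1 < t.length := (List.getElem?_eq_some_iff.mp hb).1
    have ht : t.drop m = a :: b :: t.drop (m+2) := by
      rw [List.drop_eq_getElem_cons h1, List.drop_eq_getElem_cons h2]
      simp_all
    have hpre : [a, b] <+: t.drop m := ⟨t.drop (m+2), by simp [ht]⟩
    exact hpre.isInfix.trans (t.drop_suffix m).isInfix

lemma pvHA_char (s : List Char) :
    (∃ (k : Nat) (c : Char), s[k]? = some c ∧ pvHA s ((k : Int), c) = true) ↔ pvGoodPair s := by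
  have slices : ∀ k : Nat, 1 ≤ k → k < s.length →
      (PySem.List.slice s (some ((k:Int) - 1)) (some ((k:Int) + 1)) = pvPairN s (k-1)
       ∧ PySem.List.slice s (some ((k:Int) + 1)) none = s.drop (k+1)) := by
    intro k hk1 hk
    have e1 : (k:Int) - 1 = ((k-1 : Nat) : Int) := by omega
    have e2 : (k:Int) + 1 = ((k+1 : Nat) : Int) := by push_cast; ring
    rw [e1, e2, PySem.List.slice_natCast, PySem.List.slice_from_natCast]
    have e3 : k + 1 - (k - 1) = 2 := by omega
    rw [e3]
    exact ⟨rfl, rfl⟩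
  constructor
  · rintro ⟨k, c, hk, hf⟩
    have hklen : k < s.length := (List.getElem?_eq_some_iff.mp hk).1
    simp only [pvHA, Bool.and_eq_true, decide_eq_true_eq] at hf
    obtain ⟨hk1i, hin⟩ := hf
    have hk1 : 1 ≤ k := by exact_mod_cast hk1i
    rw [(slices k hk1 hklen).1, (slices k hk1 hklen).2,
      pvPairN_pred s k hk1 hklen, PySem.Chars.isIn_iff_infix, pvInfix_pair] at hin
    obtain ⟨m, hma, hmb⟩ := hin
    rw [List.getElem?_drop] at hma hmb
    have hjb : k + 1 + (m + 1) < s.length := (List.getElem?_eq_some_iff.mp hmb).1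
    refine ⟨k - 1, k + 1 + m, by omega, by omega, ?_, ?_⟩
    · rw [hma, List.getElem?_eq_getElem (by omega)]
    · have e : k - 1 + 1 = k := by omega
      have e2 : k + 1 + m + 1 = k + 1 + (m + 1) := by omega
      rw [e, e2, hmb, List.getElem?_eq_getElem hklen]
  · rintro ⟨i, j, hij, hjl, h1, h2⟩
    have hil : i + 1 < s.length := by omega
    refine ⟨i + 1, s[i+1], List.getElem?_eq_getElem hil, ?_⟩
    simp only [pvHA, Bool.and_eq_true, decide_eq_true_eq]
    refine ⟨by exact_mod_cast Nat.le_add_left 1 i, ?_⟩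
    have hk1 : 1 ≤ i + 1 := by omega
    have hkl : i + 1 < s.length := hil
    rw [(slices (i+1) hk1 hkl).1, (slices (i+1) hk1 hkl).2,
      pvPairN_pred s (i+1) hk1 hkl, PySem.Chars.isIn_iff_infix, pvInfix_pair]
    refine ⟨j - (i + 2), ?_, ?_⟩
    · rw [List.getElem?_drop]
      have e : i + 1 + 1 + (j - (i + 2)) = j := by omega
      rw [e]
      simp only [Nat.add_sub_cancel]
      rw [← h1, List.getElem?_eq_getElem (by omega)]
    · rw [List.getElem?_drop]
      have e : i + 1 + 1 + (j - (i + 2) + 1) = j + 1 := by omega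
      rw [e, ← h2, List.getElem?_eq_getElem hil]

lemma pvGA_char (s : List Char) :
    (∃ (k : Nat) (c : Char), s[k]? = some c ∧ pvGA s ((k : Int), c) = true) ↔ pvGap s := by
  constructor
  · rintro ⟨k, c, hk, hf⟩
    have hklen : k < s.length := (List.getElem?_eq_some_iff.mp hk).1
    simp only [pvGA, Bool.and_eq_true, decide_eq_true_eq, beq_iff_eq] at hf
    obtain ⟨hk2i, hget⟩ := hf
    have hk2 : 2 ≤ k := by exact_mod_cast hk2i
    rw [show (k : Int) - 2 = ((k - 2 : Nat) : Int) by omega, PySem.List.pyGet?_natCast] at hget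
    exact ⟨k - 2, by omega, by rw [show k - 2 + 2 = k from by omega, hget, hk]⟩
  · rintro ⟨j, hj, he⟩
    refine ⟨j + 2, s[j+2], List.getElem?_eq_getElem hj, ?_⟩
    simp only [pvGA, Bool.and_eq_true, decide_eq_true_eq, beq_iff_eq]
    refine ⟨by push_cast; omega, ?_⟩
    rw [show ((j + 2 : Nat) : Int) - 2 = ((j : Nat) : Int) by push_cast; ring,
      PySem.List.pyGet?_natCast, he, List.getElem?_eq_getElem hj]

lemma pvA_iff (str : String) : is_nice_two str = true ↔ pvGoodPair str.toList ∧ pvGap str.toList := by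
  simp only [is_nice_two]
  rw [pvA_fold str.toList]
  simp only [Bool.false_or]
  rw [Bool.and_eq_true, pvAny_enumerate (pvHA str.toList) str.toList 0,
    pvAny_enumerate (pvGA str.toList) str.toList 0]
  simp only [zero_add]
  rw [pvHA_char, pvGA_char]

lemma pvFind?_range_min (m v : Nat) (p : Nat → Bool) (h : (List.range m).find? p = some v) :
    ∀ u < v, p u = false := by
  rw [List.find?_eq_some_iff_getElem] at h
  obtain ⟨hp, i, hi, hieq, hmin⟩ := h
  simp [List.getElem_range] at hieq
  subst hieq
  intro u hu
  have := hmin u hu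
  simpa [List.getElem_range] using this

def pvStepB (s : List Char) (st : PySem.Dict (List Char) Int × Bool) (i : Int) :
    PySem.Dict (List Char) Int × Bool :=
  let pair := PySem.List.slice s (some i) (some (i + 2))
  if st.1.contains pair then (st.1, if st.1.getD pair 0 + 2 ≤ i then true else st.2)
  else (st.1.insert pair i, st.2)

lemma pvSliceB (s : List Char) (m : Nat) :
    PySem.List.slice s (some (m : Int)) (some ((m : Int) + 2)) = pvPairN s m := by
  rw [show ((m : Int) + 2) = ((m + 2 : Nat) : Int) by push_cast; ring, PySem.List.slice_natCast,
    show m + 2 - m = 2 by omega]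
  rfl

lemma pvB_fold (s : List Char) (m : Nat) :
    (∀ q : List Char,
      ((List.range m).foldl (fun st (k : Nat) => pvStepB s st (k : Int)) (PySem.Dict.empty, false)).1.get? q
        = ((List.range m).find? (fun i => pvPairN s i == q)).map (fun (k : Nat) => (k : Int)))
  ∧ (((List.range m).foldl (fun st (k : Nat) => pvStepB s st (k : Int)) (PySem.Dict.empty, false)).2 = true ↔
      ∃ i j : Nat, j < m ∧ i + 2 ≤ j ∧ pvPairN s i = pvPairN s j) := by
  induction m with
  | zero => simp [PySem.Dict.get?_empty]
  | succ m ih =>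
    obtain ⟨ihd, ihb⟩ := ih
    rw [List.range_succ]
    rw [List.foldl_append]
    simp only [List.foldl_cons, List.foldl_nil]
    set P := (List.range m).foldl (fun st (k : Nat) => pvStepB s st (k : Int)) (PySem.Dict.empty, false) with hP
    have hcont : P.1.contains (pvPairN s m) =
        ((List.range m).find? (fun i => pvPairN s i == pvPairN s m)).isSome := by
      rw [PySem.Dict.contains_eq_isSome_get?, ihd]
      simp
    by_cases hc : ((List.range m).find? (fun i => pvPairN s i == pvPairN s m)).isSome = true
    · obtain ⟨v, hv⟩ := Option.isSome_iff_exists.mp hc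
      have hveq : pvPairN s v = pvPairN s m := by
        have := List.find?_some hv
        simpa using this
      have hget : P.1.getD (pvPairN s m) 0 = (v : Int) := by
        have h := ihd (pvPairN s m)
        rw [hv] at h
        simp only [Option.map_some] at h
        exact PySem.Dict.getD_of_get?_eq_some P.1 0 h
      have hstep : pvStepB s P (m : Int) =
          (P.1, if (v : Int) + 2 ≤ (m : Int) then true else P.2) := by
        unfold pvStepB
        rw [pvSliceB]
        simp only [hcont, hv, Option.isSome_some, if_true]
        rw [hget]
      rw [hstep]
      constructor
      · intro q
        rw [List.find?_append]
        by_cases hq : pvPairN s m = q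
        · subst hq
          rw [hv]
          simp [ihd, hv]
        · have hfq : (List.find? (fun i => pvPairN s i == q) [m]) = none := by
            have hbe : (pvPairN s m == q) = false := beq_eq_false_iff_ne.mpr hq
            simp [List.find?, hbe]
          rw [hfq, Option.or_none, ihd]
      · by_cases hle : (v : Int) + 2 ≤ (m : Int)
        · simp only [hle, if_true, true_iff]
          have hvm : v + 2 ≤ m := by exact_mod_cast hle
          exact ⟨v, m, by omega, hvm, hveq⟩
        · simp only [hle, if_false]
          rw [ihb]
          constructor
          · rintro ⟨i, j, hj, hij, he⟩; exact ⟨i, j, by omega, hij, he⟩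
          · rintro ⟨i, j, hj, hij, he⟩
            rcases Nat.lt_or_ge j m with hjm | hjm
            · exact ⟨i, j, hjm, hij, he⟩
            · have hjm' : j = m := by omega
              have he' : pvPairN s i = pvPairN s m := by rw [← hjm']; exact he
              have hvi : v ≤ i := by
                by_contra hvi
                have hf := pvFind?_range_min m v _ hv i (by omega)
                rw [he'] at hf
                simp at hf
              exfalso
              apply hle
              have hvm2 : v + 2 ≤ m := by omega
              exact_mod_cast hvm2
    · have hnone : (List.range m).find? (fun i => pvPairN s i == pvPairN s m) = none := by
        rw [Option.not_isSome_iff_eq_none] at hc; exact hc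
      have hstep : pvStepB s P (m : Int) = (P.1.insert (pvPairN s m) (m : Int), P.2) := by
        unfold pvStepB
        rw [pvSliceB]
        simp only [hcont, hnone, Option.isSome_none, Bool.false_eq_true, if_false]
      rw [hstep]
      constructor
      · intro q
        rw [List.find?_append]
        by_cases hq : pvPairN s m = q
        · subst hq
          rw [hnone, Option.none_or, PySem.Dict.get?_insert_self]
          simp [List.find?]
        · have hfq : (List.find? (fun i => pvPairN s i == q) [m]) = none := by
            have hbe : (pvPairN s m == q) = false := beq_eq_false_iff_ne.mpr hq
            simp [List.find?, hbe]
          rw [hfq, Option.or_none]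
          rw [PySem.Dict.get?_insert_of_ne P.1 _ (fun h => hq h.symm)]
          exact ihd q
      · rw [ihb]
        constructor
        · rintro ⟨i, j, hj, hij, he⟩; exact ⟨i, j, by omega, hij, he⟩
        · rintro ⟨i, j, hj, hij, he⟩
          rcases Nat.lt_or_ge j m with hjm | hjm
          · exact ⟨i, j, hjm, hij, he⟩
          · have hjm' : j = m := by omega
            have he' : pvPairN s i = pvPairN s m := by rw [← hjm']; exact he
            exfalso
            rw [List.find?_eq_none] at hnone
            have hf := hnone i (List.mem_range.mpr (by omega))
            rw [he'] at hf
            simp at hf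

lemma pvGapB (s : List Char) :
    ((PySem.List.pyRange 0 ((s.length : Int) - 2) 1).any
      (fun i => PySem.List.pyGet? s i == PySem.List.pyGet? s (i + 2)) = true) ↔ pvGap s := by
  rw [List.any_eq_true]
  constructor
  · rintro ⟨x, hx, hfx⟩
    rw [PySem.List.mem_pyRange_one] at hx
    obtain ⟨hx0, hx2⟩ := hx
    obtain ⟨k, rfl⟩ := Int.eq_ofNat_of_zero_le hx0
    simp only [beq_iff_eq] at hfx
    rw [PySem.List.pyGet?_natCast, show ((k : Nat) : Int) + 2 = ((k + 2 : Nat) : Int) by push_cast; ring,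
      PySem.List.pyGet?_natCast] at hfx
    exact ⟨k, by omega, hfx⟩
  · rintro ⟨k, hk, he⟩
    refine ⟨(k : Int), PySem.List.mem_pyRange_one.mpr ⟨by positivity, by omega⟩, ?_⟩
    simp only [beq_iff_eq]
    rw [PySem.List.pyGet?_natCast, show ((k : Nat) : Int) + 2 = ((k + 2 : Nat) : Int) by push_cast; ring,
      PySem.List.pyGet?_natCast]
    exact he

lemma pvHP_char (s : List Char) :
    (∃ i j : Nat, j < s.length - 1 ∧ i + 2 ≤ j ∧ pvPairN s i = pvPairN s j) ↔ pvGoodPair s := by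
  constructor
  · rintro ⟨i, j, hj, hij, he⟩
    have hjl : j + 1 < s.length := by omega
    have hil : i + 1 < s.length := by omega
    rw [pvPairN_eq s i hil, pvPairN_eq s j hjl] at he
    simp only [List.cons.injEq, and_true] at he
    obtain ⟨h1, h2⟩ := he
    exact ⟨i, j, hij, hjl, by rw [List.getElem?_eq_getElem (by omega), List.getElem?_eq_getElem (by omega), h1],
      by rw [List.getElem?_eq_getElem hil, List.getElem?_eq_getElem hjl, h2]⟩
  · rintro ⟨i, j, hij, hjl, h1, h2⟩
    have hil : i + 1 < s.length := by omega
    refine ⟨i, j, by omega, hij, ?_⟩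
    rw [pvPairN_eq s i hil, pvPairN_eq s j hjl]
    rw [List.getElem?_eq_getElem (by omega), List.getElem?_eq_getElem (by omega)] at h1
    rw [List.getElem?_eq_getElem hil, List.getElem?_eq_getElem hjl] at h2
    simp only [Option.some.injEq] at h1 h2
    rw [h1, h2]


lemma pvBfold_eq (s : List Char) :
    (PySem.List.pyRange 0 ((s.length : Int) - 1) 1).foldl
      (fun (st : PySem.Dict (List Char) Int × Bool) (i : Int) =>
        let pair := PySem.List.slice s (some i) (some (i + 2))
        if st.1.contains pair then
          (st.1, if st.1.getD pair 0 + 2 ≤ i then true else st.2)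
        else
          (st.1.insert pair i, st.2)) (PySem.Dict.empty, false)
    = (List.range (s.length - 1)).foldl (fun st (k : Nat) => pvStepB s st (k : Int))
        (PySem.Dict.empty, false) := by
  rw [PySem.List.pyRange_one, List.foldl_map]
  rw [show (((s.length : Int) - 1) - 0).toNat = s.length - 1 by omega]
  simp only [zero_add]
  rfl

lemma pvB_iff (str : String) : is_nice_two_alt str = true ↔ pvGoodPair str.toList ∧ pvGap str.toList := by
  simp only [is_nice_two_alt]
  rw [pvBfold_eq, Bool.and_eq_true, (pvB_fold str.toList (str.toList.length - 1)).2,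
    pvGapB, pvHP_char]

-- ===== VERDICT (by name: the statement is the Claim_ definition above) =====
theorem is_nice_two_spec : Claim_equal_is_nice_two := by
  intro str _
  unfold Spec_is_nice_two
  apply Bool.coe_iff_coe.mp
  rw [pvA_iff, pvB_iff]
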